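-- pv_equiv track=rewrite | github.com/msull/wordsearcher | wordsearch.py | _diagonal_down_right_strings
-- ===== SOURCE A (Python) =====
-- def _reverse_strs(strs):
--     return list([x[::-1] for x in strs])
--
-- def _diagonal_down_right_strings(grid):
--     strs = list()
--     size = len(grid)
--     center_str = list()
--     for x in range(size):
--         center_str.append(grid[x][x])
--     strs.append(''.join(center_str))
--
--     for x in range(1, size):
--         this_str_1 = list()
--         this_str_2 = list()
--         for y in range(x, size):
--             this_str_1.append(grid[y][y - x])
--             this_str_2.append(grid[y - x][y])
--         strs.append(''.join(this_str_1))
--         strs.append(''.join(this_str_2))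
--     return strs + _reverse_strs(strs)
-- ===== SOURCE B (Python) =====
-- def _diagonal_down_right_strings(grid):
--     # Single pass over all cells builds a dict of diagonals keyed by i - j,
--     # then the strings are emitted in the order 0, 1, -1, 2, -2, ...
--     size = len(grid)
--     diags = {}
--     for i in range(size):
--         for j in range(size):
--             diags.setdefault(i - j, []).append(grid[i][j])
--     strs = [''.join(diags.get(0, []))]
--     for x in range(1, size):
--         strs.append(''.join(diags[x]))
--         strs.append(''.join(diags[-x]))
--     return strs + [s[::-1] for s in strs]
-- ===== Notes on version B (the rewrite author's own statement) =====
-- stated objective: alternative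
-- what changed: Replaces A's per-diagonal nested re-scans (a center loop plus a two-accumulator loop per offset) with one pass over all cells building a dict of diagonal buckets keyed by i-j, then emits the strings from the buckets in A's order 0, 1, -1, 2, -2, ...
import Mathlib
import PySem

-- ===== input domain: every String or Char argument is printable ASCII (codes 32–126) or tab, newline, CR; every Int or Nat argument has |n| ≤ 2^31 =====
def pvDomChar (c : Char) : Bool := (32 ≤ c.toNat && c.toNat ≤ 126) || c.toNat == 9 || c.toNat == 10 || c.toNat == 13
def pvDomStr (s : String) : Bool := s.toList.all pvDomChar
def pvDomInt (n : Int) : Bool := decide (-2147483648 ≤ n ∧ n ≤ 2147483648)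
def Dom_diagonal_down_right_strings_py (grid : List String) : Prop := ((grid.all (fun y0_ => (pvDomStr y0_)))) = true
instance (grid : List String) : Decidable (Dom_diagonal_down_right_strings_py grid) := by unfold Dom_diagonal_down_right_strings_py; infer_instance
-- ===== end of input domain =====

-- B replaces A's per-diagonal nested re-scans with one pass over all cells building a dict of
-- diagonal buckets keyed by i - j, emitted in A's order 0, 1, -1, 2, -2, ... (objective: alternative).

-- grid[i][j], as both Pythons write it; ported as pyGetD on the row's character list.  The
-- defaults are never read under Pre_ (out of range Python raises IndexError, excluded there).
def pvCell (grid : List String) (i j : Int) : Char :=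
  PySem.List.pyGetD (PySem.List.pyGetD grid i "").toList j ' '

-- ===== PORT A =====
def diagonal_down_right_strings_py (grid : List String) : List String :=
  let size : Int := grid.length
  let center_str : List Char :=
    (PySem.List.pyRange 0 size 1).foldl (fun acc x => acc ++ [pvCell grid x x]) []
  let strs : List String := [] ++ [String.ofList center_str]   -- ''.join of a char list is String.ofList
  let strs : List String :=
    (PySem.List.pyRange 1 size 1).foldl
      (fun strs x =>
        let p : List Char × List Char :=
          (PySem.List.pyRange x size 1).foldl
            (fun (p : List Char × List Char) y =>
              (p.1 ++ [pvCell grid y (y - x)], p.2 ++ [pvCell grid (y - x) y]))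
            ([], [])
        strs ++ [String.ofList p.1] ++ [String.ofList p.2])
      strs
  -- _reverse_strs: x[::-1] for each collected string
  strs ++ strs.map (fun s => (PySem.Str.slice? s none none (-1)).getD "")

-- ===== PORT B =====
-- diags.setdefault(i-j, []).append(c) is value-exact Dict.modify (i-j) [] (· ++ [c]).
def diagonal_down_right_strings_py_alt (grid : List String) : List String :=
  let size : Int := grid.length
  let diags : PySem.Dict Int (List Char) :=
    (PySem.List.pyRange 0 size 1).foldl
      (fun d i =>
        (PySem.List.pyRange 0 size 1).foldl
          (fun d j => d.modify (i - j) [] (fun b => b ++ [pvCell grid i j]))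
          d)
      PySem.Dict.empty
  let strs : List String := [String.ofList (diags.getD 0 [])]
  let strs : List String :=
    (PySem.List.pyRange 1 size 1).foldl
      (fun strs x =>
        strs ++ [String.ofList (diags.getD x []), String.ofList (diags.getD (-x) [])])
      strs
  strs ++ strs.map (fun s => (PySem.Str.slice? s none none (-1)).getD "")

-- ===== PRECONDITION & SPEC =====
-- Pre_ excludes ragged grids with a row shorter than len(grid): there grid[i][j] raises
-- IndexError in both programs (rows longer than len(grid) are allowed and covered).
def Pre_diagonal_down_right_strings_py (grid : List String) : Prop :=
  ∀ s ∈ grid, grid.length ≤ s.toList.length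
instance (grid : List String) : Decidable (Pre_diagonal_down_right_strings_py grid) := by unfold Pre_diagonal_down_right_strings_py; infer_instance
def pvWitness_diagonal_down_right_strings_py : List String := ["ab", "cd"]

def Spec_diagonal_down_right_strings_py (grid : List String) (out : List String) : Prop := out = diagonal_down_right_strings_py_alt grid
instance (grid : List String) (out : List String) : Decidable (Spec_diagonal_down_right_strings_py grid out) := by unfold Spec_diagonal_down_right_strings_py; infer_instance

-- ===== CLAIM (what is proved, stated in full; the proofs are below) =====
def Claim_equal_diagonal_down_right_strings_py : Prop := ∀ (grid : List String), Dom_diagonal_down_right_strings_py grid → Pre_diagonal_down_right_strings_py grid → Spec_diagonal_down_right_strings_py grid (diagonal_down_right_strings_py grid)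

-- ===== LEMMAS AND PROOFS =====

-- a flatMap of conditional singletons is a filtered map
theorem pvFlatMap_if {α β : Type} (l : List α) (p : α → Prop) [DecidablePred p] (f : α → β) :
    l.flatMap (fun i => if p i then [f i] else [])
      = (l.filter (fun i => decide (p i))).map f := by
  induction l with
  | nil => rfl
  | cons a t ih => by_cases h : p a <;> simp [List.flatMap_cons, h, ih]

-- filtering a range by an interval is the intersected range
theorem pvFilter_interval (a b lo hi : Int) :
    (PySem.List.pyRange a b 1).filter (fun i => decide (lo ≤ i ∧ i < hi))
      = PySem.List.pyRange (max a lo) (min b hi) 1 := by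
  by_cases hab : b ≤ a
  · rw [PySem.List.pyRange_one_eq_nil hab, PySem.List.pyRange_one_eq_nil (by omega)]; rfl
  · replace hab : a < b := by omega
    rw [PySem.List.pyRange_one_cons hab]
    have ih := pvFilter_interval (a + 1) b lo hi
    by_cases hc : lo ≤ a ∧ a < hi
    · have h1 : max a lo = a := by omega
      have h2 : max (a + 1) lo = a + 1 := by omega
      have h3 : a < min b hi := by omega
      rw [List.filter_cons_of_pos (by simpa using hc), ih, h1, h2,
        PySem.List.pyRange_one_cons h3]
    · rw [List.filter_cons_of_neg (by simpa using hc), ih]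
      by_cases hlo : a < lo
      · have h : max (a + 1) lo = max a lo := by omega
        rw [h]
      · rw [PySem.List.pyRange_one_eq_nil (by omega), PySem.List.pyRange_one_eq_nil (by omega)]
termination_by (b - a).toNat
decreasing_by omega

-- filtering a range for the unique j with i - j = k
theorem pvFilter_eqkey (a b i k : Int) :
    (PySem.List.pyRange a b 1).filter (fun j => i - j == k)
      = if a ≤ i - k ∧ i - k < b then [i - k] else [] := by
  have hcongr : (PySem.List.pyRange a b 1).filter (fun j => i - j == k)
      = (PySem.List.pyRange a b 1).filter (fun j => decide (i - k ≤ j ∧ j < i - k + 1)) := by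
    apply List.filter_congr
    intro j _
    by_cases h : i - j = k
    · have h1 : (i - j == k) = true := by simp [h]
      rw [h1]
      symm
      rw [decide_eq_true_eq]
      omega
    · have h1 : (i - j == k) = false := by simpa using h
      simp [h1]
      omega
  rw [hcongr, pvFilter_interval]
  split_ifs with hcond
  · rw [show max a (i - k) = i - k by omega, show min b (i - k + 1) = i - k + 1 by omega,
      PySem.List.pyRange_one_singleton]
  · rw [PySem.List.pyRange_one_eq_nil (by omega)]

-- proof-side name for B's diagonal dict
def pvDiags (grid : List String) : PySem.Dict Int (List Char) :=
  (PySem.List.pyRange 0 (grid.length : Int) 1).foldl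
    (fun d i =>
      (PySem.List.pyRange 0 (grid.length : Int) 1).foldl
        (fun d j => d.modify (i - j) [] (fun b => b ++ [pvCell grid i j])) d)
    PySem.Dict.empty

-- the dict bucket for key k holds exactly diagonal k, rows increasing
theorem pvBucket (grid : List String) (k : Int) :
    ((pvDiags grid).getD k [])
      = (PySem.List.pyRange (max 0 k) (min (grid.length : Int) ((grid.length : Int) + k)) 1).map
          (fun i => pvCell grid i (i - k)) := by
  unfold pvDiags
  have hinner : (fun (d : PySem.Dict Int (List Char)) (i : Int) =>
      (PySem.List.pyRange 0 (grid.length : Int) 1).foldl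
        (fun d j => d.modify (i - j) [] (fun b => b ++ [pvCell grid i j])) d)
      = fun d i =>
        (((PySem.List.pyRange 0 (grid.length : Int) 1).map
          (fun j => (i - j, pvCell grid i j))).foldl
          (fun d p => d.modify p.1 [] (fun b => b ++ [p.2])) d) := by
    funext d i
    rw [List.foldl_map]
  rw [hinner, ← List.foldl_flatMap, PySem.Dict.getD_foldl_modify_append]
  rw [PySem.Dict.getD_empty, List.nil_append]
  rw [List.filter_flatMap, List.map_flatMap]
  have hin : (fun i => ((( PySem.List.pyRange 0 (grid.length : Int) 1).map
        (fun j => (i - j, pvCell grid i j))).filter (fun p => p.1 == k)).map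
        (fun x => x.2))
      = fun i => if 0 ≤ i - k ∧ i - k < (grid.length : Int)
          then [pvCell grid i (i - k)] else [] := by
    funext i
    rw [List.filter_map, List.map_map]
    have hp : ((fun (p : Int × Char) => p.1 == k) ∘ fun j => (i - j, pvCell grid i j))
        = fun j => i - j == k := rfl
    rw [hp, pvFilter_eqkey 0 (grid.length : Int) i k]
    split_ifs <;> simp
  rw [hin, pvFlatMap_if]
  have hfc : (PySem.List.pyRange 0 (grid.length : Int) 1).filter
        (fun i => decide (0 ≤ i - k ∧ i - k < (grid.length : Int)))
      = (PySem.List.pyRange 0 (grid.length : Int) 1).filter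
        (fun i => decide (k ≤ i ∧ i < (grid.length : Int) + k)) := by
    apply List.filter_congr
    intro i _
    simp only [decide_eq_decide]
    omega
  rw [hfc, pvFilter_interval]

-- shifting the index range of a map
theorem pvMap_shift (a b t : Int) {β : Type} (f : Int → β) :
    (PySem.List.pyRange a b 1).map (fun y => f (y - t))
      = (PySem.List.pyRange (a - t) (b - t) 1).map f := by
  simp only [PySem.List.pyRange_one, List.map_map, Function.comp_def]
  have h : (b - t - (a - t)) = b - a := by ring
  rw [h]
  exact List.map_congr_left (fun n _ => by congr 1; ring)

-- the collected strings of the two ports agree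
theorem pvStrs (grid : List String) :
    (PySem.List.pyRange 1 (grid.length : Int) 1).foldl
      (fun strs x =>
        let p : List Char × List Char :=
          (PySem.List.pyRange x (grid.length : Int) 1).foldl
            (fun (p : List Char × List Char) y =>
              (p.1 ++ [pvCell grid y (y - x)], p.2 ++ [pvCell grid (y - x) y]))
            ([], [])
        strs ++ [String.ofList p.1] ++ [String.ofList p.2])
      ([] ++ [String.ofList
        ((PySem.List.pyRange 0 (grid.length : Int) 1).foldl
          (fun acc x => acc ++ [pvCell grid x x]) [])])
    = (PySem.List.pyRange 1 (grid.length : Int) 1).foldl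
      (fun strs x =>
        strs ++ [String.ofList ((pvDiags grid).getD x []),
                 String.ofList ((pvDiags grid).getD (-x) [])])
      [String.ofList ((pvDiags grid).getD 0 [])] := by
  have hcenter : ((PySem.List.pyRange 0 (grid.length : Int) 1).foldl
        (fun acc x => acc ++ [pvCell grid x x]) [])
      = (pvDiags grid).getD 0 [] := by
    rw [PySem.List.foldl_append_singleton_eq_map, List.nil_append, pvBucket]
    rw [show max (0 : Int) 0 = 0 from rfl, show min (grid.length : Int) ((grid.length : Int) + 0)
        = (grid.length : Int) by omega]
    simp only [sub_zero]
  rw [List.nil_append, hcenter]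
  apply PySem.List.foldl_congr_mem
  intro acc x hx
  rw [PySem.List.mem_pyRange_one] at hx
  show acc ++ _ ++ _ = _
  rw [PySem.List.foldl_prod_mk
    (f := fun a y => a ++ [pvCell grid y (y - x)])
    (g := fun a y => a ++ [pvCell grid (y - x) y])]
  rw [PySem.List.foldl_append_singleton_eq_map, PySem.List.foldl_append_singleton_eq_map,
    List.nil_append, List.nil_append]
  have hb1 : ((PySem.List.pyRange x (grid.length : Int) 1).map (fun y => pvCell grid y (y - x)))
      = (pvDiags grid).getD x [] := by
    rw [pvBucket, show max (0 : Int) x = x by omega,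
      show min (grid.length : Int) ((grid.length : Int) + x) = (grid.length : Int) by omega]
  have hb2 : ((PySem.List.pyRange x (grid.length : Int) 1).map (fun y => pvCell grid (y - x) y))
      = (pvDiags grid).getD (-x) [] := by
    rw [pvBucket, show max (0 : Int) (-x) = 0 by omega,
      show min (grid.length : Int) ((grid.length : Int) + -x) = (grid.length : Int) - x by omega]
    simp only [sub_neg_eq_add]
    have hf : (fun y => pvCell grid (y - x) y) = fun y => pvCell grid (y - x) (y - x + x) := by
      funext y
      rw [sub_add_cancel]
    rw [hf, pvMap_shift x (grid.length : Int) x (fun i => pvCell grid i (i + x)),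
      show x - x = (0 : Int) by omega]
  rw [hb1, hb2, List.append_assoc]
  rfl

-- ===== VERDICT (by name: the statement is the Claim_ definition above) =====
theorem diagonal_down_right_strings_py_spec : Claim_equal_diagonal_down_right_strings_py := by
  intro grid _ _
  unfold Spec_diagonal_down_right_strings_py
  unfold diagonal_down_right_strings_py diagonal_down_right_strings_py_alt
  simp only []
  rw [pvStrs grid]
  unfold pvDiags
  rfl
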